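-- pv_equiv track=rewrite | github.com/tuxedocat/Nyanco | src/lsa_test/commonutils.py | _retrieve_ngram
-- ===== SOURCE A (Python) =====
-- def _retrieve_ngram(sent, center, window, test, lower):
--     words = sent.split()
--     try:
--         c_index = words.index(center)
--         if test is True:
--             ngram = [word for index, word in enumerate(words)
--                         if index != c_index and index >= c_index - window and index <= c_index + window]
--         elif lower is True:
--             ngram = [word.lower() for index, word in enumerate(words)
--                         if index >= c_index - window and index <= c_index + window]
--         else:
--             ngram = [word for index, word in enumerate(words)
--                         if index >= c_index - window and index <= c_index + window]
--         if ngram: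
--             return ngram
--     except ValueError:
--         return []
-- ===== SOURCE B (Python) =====
-- def _retrieve_ngram(sent, center, window, test, lower):
--     words = sent.split()
--     try:
--         c = words.index(center)
--     except ValueError:
--         return []
--     start = max(0, c - window)
--     stop = min(c + window + 1, len(words))
--     out = []
--     for i in range(start, stop):
--         if test:
--             if i == c:
--                 continue
--             out.append(words[i])
--         elif lower:
--             out.append(words[i].lower())
--         else:
--             out.append(words[i])
--     return out if out else None
-- ===== Notes on version B (the rewrite author's own statement) =====
-- stated objective: alternative
-- what changed: A filters the full enumerate(words) scan by an index-window predicate per branch; B precomputes the clipped window bounds [max(0,c-window), min(c+window+1,len(words))) and walks only those indices once, skipping the center when test is set.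
import Mathlib
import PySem

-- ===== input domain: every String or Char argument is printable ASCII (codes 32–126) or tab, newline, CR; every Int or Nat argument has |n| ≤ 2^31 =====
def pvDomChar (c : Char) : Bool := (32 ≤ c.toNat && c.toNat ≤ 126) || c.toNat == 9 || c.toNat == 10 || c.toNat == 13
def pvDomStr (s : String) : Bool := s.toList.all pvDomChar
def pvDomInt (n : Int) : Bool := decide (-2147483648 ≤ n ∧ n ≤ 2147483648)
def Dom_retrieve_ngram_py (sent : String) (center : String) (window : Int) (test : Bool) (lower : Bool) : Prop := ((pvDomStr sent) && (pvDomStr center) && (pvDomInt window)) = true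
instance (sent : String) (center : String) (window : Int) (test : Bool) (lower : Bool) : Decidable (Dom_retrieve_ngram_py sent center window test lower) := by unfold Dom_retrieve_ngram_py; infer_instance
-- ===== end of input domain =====

-- B replaces A's full enumerate-and-filter scan over all words by a bounded loop over the
-- precomputed index window [max(0,c-window), min(c+window+1,len)) (objective: alternative decomposition).

-- ===== PORT A =====
def retrieve_ngram_py (sent : String) (center : String) (window : Int) (test : Bool) (lower : Bool) : Option (List String) :=
  let words := PySem.Str.split₀ sent
  match PySem.List.index? words center with
  | none => some []                    -- except ValueError: return []
  | some c =>
    let ci : Int := (c : Int)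
    let ngram : List String :=
      if test = true then
        ((PySem.List.enumerate words 0).filter
          (fun p => decide (p.1 ≠ ci) && decide (p.1 ≥ ci - window) && decide (p.1 ≤ ci + window))).map (·.2)
      else if lower = true then
        ((PySem.List.enumerate words 0).filter
          (fun p => decide (p.1 ≥ ci - window) && decide (p.1 ≤ ci + window))).map (fun p => PySem.Str.lower p.2)
      else
        ((PySem.List.enumerate words 0).filter
          (fun p => decide (p.1 ≥ ci - window) && decide (p.1 ≤ ci + window))).map (·.2)
    if ngram ≠ [] then some ngram else none     -- if ngram: return ngram  (else fall through → None)

-- ===== PORT B =====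
def retrieve_ngram_py_alt (sent : String) (center : String) (window : Int) (test : Bool) (lower : Bool) : Option (List String) :=
  let words := PySem.Str.split₀ sent
  match PySem.List.index? words center with
  | none => some []                    -- except ValueError: return []
  | some c =>
    let ci : Int := (c : Int)
    let start : Int := max 0 (ci - window)
    let stop : Int := min (ci + window + 1) (words.length : Int)
    let out : List String :=
      (PySem.List.pyRange start stop 1).foldl
        (fun acc i =>
          if test then
            (if i == ci then acc else acc ++ [PySem.List.pyGetD words i ""])
          else if lower then
            acc ++ [PySem.Str.lower (PySem.List.pyGetD words i "")]
          else
            acc ++ [PySem.List.pyGetD words i ""]) []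
    if out ≠ [] then some out else none         -- return out if out else None

-- ===== PRECONDITION & SPEC =====
def Spec_retrieve_ngram_py (sent : String) (center : String) (window : Int) (test : Bool) (lower : Bool) (out : Option (List String)) : Prop := out = retrieve_ngram_py_alt sent center window test lower
instance (sent : String) (center : String) (window : Int) (test : Bool) (lower : Bool) (out : Option (List String)) : Decidable (Spec_retrieve_ngram_py sent center window test lower out) := by unfold Spec_retrieve_ngram_py; infer_instance

-- ===== CLAIM (what is proved, stated in full; the proofs are below) =====
def Claim_equal_retrieve_ngram_py : Prop := ∀ (sent : String) (center : String) (window : Int) (test : Bool) (lower : Bool), Dom_retrieve_ngram_py sent center window test lower → Spec_retrieve_ngram_py sent center window test lower (retrieve_ngram_py sent center window test lower)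

-- ===== LEMMAS AND PROOFS =====

-- 'for x in l: if p x: continue; out.append(f x)' = filter-then-map
theorem pv_foldl_skip {α β : Type} (l : List α) (p : α → Bool) (f : α → β) (acc : List β) :
    l.foldl (fun acc x => if p x then acc else acc ++ [f x]) acc
      = acc ++ (l.filter (fun x => !(p x))).map f := by
  induction l generalizing acc with
  | nil => simp
  | cons x xs ih =>
    by_cases h : p x = true <;> simp [List.foldl_cons, h, ih, List.append_assoc]

theorem pv_foldl_append {α β : Type} (l : List α) (f : α → β) (acc : List β) :
    l.foldl (fun acc x => acc ++ [f x]) acc = acc ++ l.map f := by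
  induction l generalizing acc with
  | nil => simp
  | cons x xs ih => simp [List.foldl_cons, ih]

-- filtering range(0,n) by an interval test = the clipped range
theorem pv_filter_interval (n lo hi : Int) (q : Int → Bool) :
    (PySem.List.pyRange 0 n 1).filter (fun j => (decide (lo ≤ j) && decide (j ≤ hi)) && q j)
      = (PySem.List.pyRange (max 0 lo) (min (hi + 1) n) 1).filter q := by
  by_cases h : max 0 lo ≤ min (hi + 1) n
  · rw [PySem.List.pyRange_one_append 0 (max 0 lo) n (by omega) (by omega),
        PySem.List.pyRange_one_append (max 0 lo) (min (hi + 1) n) n h (by omega),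
        List.filter_append, List.filter_append]
    have hl : List.filter (fun j => decide (lo ≤ j) && decide (j ≤ hi) && q j)
        (PySem.List.pyRange 0 (max 0 lo) 1) = [] := by
      apply List.filter_eq_nil_iff.2
      intro j hj
      rw [PySem.List.mem_pyRange_one] at hj
      have : ¬ (lo ≤ j) := by omega
      simp [this]
    have hr : List.filter (fun j => decide (lo ≤ j) && decide (j ≤ hi) && q j)
        (PySem.List.pyRange (min (hi + 1) n) n 1) = [] := by
      apply List.filter_eq_nil_iff.2
      intro j hj
      rw [PySem.List.mem_pyRange_one] at hj
      have : ¬ (j ≤ hi) := by omega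
      simp [this]
    have hm : List.filter (fun j => decide (lo ≤ j) && decide (j ≤ hi) && q j)
        (PySem.List.pyRange (max 0 lo) (min (hi + 1) n) 1)
        = List.filter q (PySem.List.pyRange (max 0 lo) (min (hi + 1) n) 1) := by
      apply List.filter_congr
      intro j hj
      rw [PySem.List.mem_pyRange_one] at hj
      have h1 : lo ≤ j := by omega
      have h2 : j ≤ hi := by omega
      simp [h1, h2]
    rw [hl, hr, hm]
    simp
  · have e1 : PySem.List.pyRange (max 0 lo) (min (hi + 1) n) 1 = [] :=
      PySem.List.pyRange_one_eq_nil (by omega)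
    have e2 : List.filter (fun j => decide (lo ≤ j) && decide (j ≤ hi) && q j)
        (PySem.List.pyRange 0 n 1) = [] := by
      apply List.filter_eq_nil_iff.2
      intro j hj
      rw [PySem.List.mem_pyRange_one] at hj
      by_cases h1 : lo ≤ j
      · have : ¬ (j ≤ hi) := by omega
        simp [this]
      · simp [h1]
    rw [e1, e2]
    simp

-- A's filtered enumerate scan, rephrased over the clipped index range
theorem pv_A_side (words : List String) (ci window : Int) (F : String → String) (q : Int → Bool) :
    ((PySem.List.enumerate words).filter
        (fun p => (decide (ci - window ≤ p.1) && decide (p.1 ≤ ci + window)) && q p.1)).map (fun p => F p.2)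
      = ((PySem.List.pyRange (max 0 (ci - window)) (min (ci + window + 1) (words.length : Int)) 1).filter q).map
          (fun i => F (PySem.List.pyGetD words i "")) := by
  rw [PySem.List.enumerate_eq_map_pyRange words "", List.filter_map, List.map_map, PySem.List.len_eq]
  rw [show ((fun (p : Int × String) => (decide (ci - window ≤ p.1) && decide (p.1 ≤ ci + window)) && q p.1) ∘
        (fun j => (j, PySem.List.pyGetD words j ""))) =
      (fun j => (decide (ci - window ≤ j) && decide (j ≤ ci + window)) && q j) from rfl]
  rw [pv_filter_interval ((words.length : Int)) (ci - window) (ci + window) q]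
  rfl

theorem pv_if_congr {l1 l2 : List String} (h : l1 = l2) :
    (if l1 ≠ [] then some l1 else none) = (if l2 ≠ [] then some l2 else none) := by subst h; rfl

-- ===== VERDICT (by name: the statement is the Claim_ definition above) =====
theorem retrieve_ngram_py_spec : Claim_equal_retrieve_ngram_py := by
  intro sent center window test lower _
  show retrieve_ngram_py sent center window test lower = retrieve_ngram_py_alt sent center window test lower
  unfold retrieve_ngram_py retrieve_ngram_py_alt
  simp only [PySem.List.index?_eq_idxOf?]
  cases hidx : List.idxOf? center (PySem.Str.split₀ sent) with
  | none => simp only [hidx]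
  | some c =>
    simp only [hidx]
    apply pv_if_congr
    set ws := PySem.Str.split₀ sent with hws
    cases test with
    | true =>
      have h1 : List.filter
            (fun p => decide (p.1 ≠ (c : Int)) && decide (p.1 ≥ (c : Int) - window) && decide (p.1 ≤ (c : Int) + window))
            (PySem.List.enumerate ws)
          = List.filter
            (fun p => (decide ((c : Int) - window ≤ p.1) && decide (p.1 ≤ (c : Int) + window)) && !(p.1 == (c : Int)))
            (PySem.List.enumerate ws) := by
        apply List.filter_congr
        intro p _
        by_cases hx1 : (c : Int) - window ≤ p.1 <;> by_cases hx2 : p.1 ≤ (c : Int) + window <;>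
          by_cases hx3 : p.1 = (c : Int) <;> simp [hx1, hx2, hx3]
      have hA := pv_A_side ws ((c : Int)) window (fun w => w) (fun i => !(i == (c : Int)))
      have hF := pv_foldl_skip
        (PySem.List.pyRange (max 0 ((c : Int) - window)) (min ((c : Int) + window + 1) (ws.length : Int)) 1)
        (fun i => i == (c : Int)) (fun i => PySem.List.pyGetD ws i "") ([] : List String)
      exact (congrArg (List.map (fun x : Int × String => x.2)) h1).trans
        (hA.trans ((hF.trans (List.nil_append _)).symm))
    | false =>
      have h1 : ∀ (F : String → String), List.filter
            (fun p => decide (p.1 ≥ (c : Int) - window) && decide (p.1 ≤ (c : Int) + window))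
            (PySem.List.enumerate ws)
          = List.filter
            (fun p => (decide ((c : Int) - window ≤ p.1) && decide (p.1 ≤ (c : Int) + window)) && (fun _ => true) p.1)
            (PySem.List.enumerate ws) := by
        intro F
        apply List.filter_congr
        intro p _
        simp
      cases lower with
      | true =>
        have hA := pv_A_side ws ((c : Int)) window PySem.Str.lower (fun _ => true)
        have hF := pv_foldl_append
          (PySem.List.pyRange (max 0 ((c : Int) - window)) (min ((c : Int) + window + 1) (ws.length : Int)) 1)
          (fun i => PySem.Str.lower (PySem.List.pyGetD ws i "")) ([] : List String)
        have hT : List.filter (fun _ => true)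
            (PySem.List.pyRange (max 0 ((c : Int) - window)) (min ((c : Int) + window + 1) (ws.length : Int)) 1)
          = PySem.List.pyRange (max 0 ((c : Int) - window)) (min ((c : Int) + window + 1) (ws.length : Int)) 1 := by
          simp
        exact (congrArg (List.map (fun p : Int × String => PySem.Str.lower p.2)) (h1 PySem.Str.lower)).trans
          ((hA.trans (congrArg _ hT)).trans ((hF.trans (List.nil_append _)).symm))
      | false =>
        have hA := pv_A_side ws ((c : Int)) window (fun w => w) (fun _ => true)
        have hF := pv_foldl_append
          (PySem.List.pyRange (max 0 ((c : Int) - window)) (min ((c : Int) + window + 1) (ws.length : Int)) 1)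
          (fun i => PySem.List.pyGetD ws i "") ([] : List String)
        have hT : List.filter (fun _ => true)
            (PySem.List.pyRange (max 0 ((c : Int) - window)) (min ((c : Int) + window + 1) (ws.length : Int)) 1)
          = PySem.List.pyRange (max 0 ((c : Int) - window)) (min ((c : Int) + window + 1) (ws.length : Int)) 1 := by
          simp
        exact (congrArg (List.map (fun x : Int × String => x.2)) (h1 (fun w => w))).trans
          ((hA.trans (congrArg _ hT)).trans ((hF.trans (List.nil_append _)).symm))
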